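-- pv_equiv track=rewrite | github.com/rkdalsdn94/algoalgo | programmers/Lv2/롤케이크_자르기.py | solution
-- ===== SOURCE A (Python) =====
-- def solution(topping):
--     answer = 0
--
--     # 오른쪽 부분의 모든 토핑 개수 카운팅
--     right_dict = {}
--     for t in topping:
--         right_dict[t] = right_dict.get(t, 0) + 1
--
--     # 왼쪽 부분의 토핑 종류 저장할 딕셔너리
--     left_dict = {}
--
--     # 토핑을 하나씩 왼쪽으로 이동시키며 비교
--     for t in topping:
--         # 현재 토핑을 왼쪽에 추가
--         left_dict[t] = left_dict.get(t, 0) + 1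
--
--         # 오른쪽에서 현재 토핑 개수 감소
--         right_dict[t] -= 1
--
--         # 오른쪽에서 토핑이 더 이상 없으면 제거
--         if right_dict[t] == 0:
--             del right_dict[t]
--
--         # 양쪽의 토핑 종류 수가 같으면 정답 증가
--         if len(left_dict) == len(right_dict):
--             answer += 1
--
--     return answer
-- ===== SOURCE B (Python) =====
-- def solution(topping):
--     # backward pass: right[i] = number of distinct toppings strictly after i
--     seen = set()
--     right = []
--     for t in reversed(topping):
--         right.append(len(seen))
--         seen.add(t)
--     right.reverse()
--     # forward pass with a single growing set
--     left = set()
--     answer = 0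
--     for t, r in zip(topping, right):
--         left.add(t)
--         if len(left) == r:
--             answer += 1
--     return answer
-- ===== Notes on version B (the rewrite author's own statement) =====
-- stated objective: alternative
-- what changed: Replaces the two live Counter dicts with decrement-and-delete bookkeeping by a separate backward pass that precomputes a suffix-distinct array, then a single forward pass growing one set and comparing its size to the precomputed value.
import Mathlib
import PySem

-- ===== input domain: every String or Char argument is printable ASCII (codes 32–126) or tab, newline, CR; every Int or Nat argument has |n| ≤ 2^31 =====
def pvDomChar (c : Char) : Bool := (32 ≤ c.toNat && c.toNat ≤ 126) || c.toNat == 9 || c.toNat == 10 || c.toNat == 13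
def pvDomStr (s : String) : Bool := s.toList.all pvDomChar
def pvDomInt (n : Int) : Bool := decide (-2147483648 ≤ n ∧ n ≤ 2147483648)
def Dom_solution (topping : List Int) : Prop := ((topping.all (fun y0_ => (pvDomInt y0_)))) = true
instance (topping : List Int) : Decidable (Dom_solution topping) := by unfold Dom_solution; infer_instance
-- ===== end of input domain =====

-- B replaces A's two live counter dicts (decrement-and-delete) by a backward pass precomputing a suffix-distinct array plus one forward set; alternative decomposition, same O(n) cost.

-- ===== PORT A =====
-- the body of A's second for-loop
def stepA (st : Int × PySem.Dict Int Int × PySem.Dict Int Int) (t : Int) :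
    Int × PySem.Dict Int Int × PySem.Dict Int Int :=
  let left := st.2.1.insert t (st.2.1.getD t 0 + 1)
  let right1 := st.2.2.insert t (st.2.2.getD t 0 - 1)
  let right2 := if right1.getD t 0 = 0 then right1.erase t else right1
  let answer := if left.size = right2.size then st.1 + 1 else st.1
  (answer, left, right2)

def solution (topping : List Int) : Int :=
  let right := topping.foldl (fun d t => d.insert t (d.getD t 0 + 1)) (PySem.Dict.empty : PySem.Dict Int Int)
  let st := topping.foldl stepA (0, PySem.Dict.empty, right)
  st.1

-- ===== PORT B =====
-- body of B's backward loop: append len(seen), then add t to seen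
def stepB1 (st : PySem.Set Int × List Int) (t : Int) : PySem.Set Int × List Int :=
  (PySem.Set.add st.1 t, st.2 ++ [(st.1.length : Int)])

-- body of B's forward loop over zip(topping, right)
def stepB2 (st : PySem.Set Int × Int) (tr : Int × Int) : PySem.Set Int × Int :=
  let left := PySem.Set.add st.1 tr.1
  (left, if (left.length : Int) = tr.2 then st.2 + 1 else st.2)

def solution_alt (topping : List Int) : Int :=
  let p := topping.reverse.foldl stepB1 (PySem.Set.empty, [])
  let right := p.2.reverse
  let q := (topping.zip right).foldl stepB2 (PySem.Set.empty, 0)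
  q.2

-- ===== PRECONDITION & SPEC =====
def Spec_solution (topping : List Int) (out : Int) : Prop := out = solution_alt topping
instance (topping : List Int) (out : Int) : Decidable (Spec_solution topping out) := by unfold Spec_solution; infer_instance

-- ===== CLAIM (what is proved, stated in full; the proofs are below) =====
def Claim_equal_solution : Prop := ∀ (topping : List Int), Dom_solution topping → Spec_solution topping (solution topping)

-- ===== LEMMAS AND PROOFS =====

-- common reference: walk the list keeping the prefix set, compare with the suffix's distinct count
def refGo (left : PySem.Set Int) : List Int → Int
  | [] => 0
  | t :: s =>
      (if (PySem.Set.add left t).length = (PySem.Set.ofList s).length then 1 else 0)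
      + refGo (PySem.Set.add left t) s

-- two Nodup lists with the same members have the same length
theorem length_eq_of_nodup_mem {l₁ l₂ : List Int} (h1 : l₁.Nodup) (h2 : l₂.Nodup)
    (h : ∀ x, x ∈ l₁ ↔ x ∈ l₂) : l₁.length = l₂.length :=
  ((List.perm_ext_iff_of_nodup h1 h2).mpr h).length_eq

theorem size_eq_keys_length (d : PySem.Dict Int Int) : d.size = d.keys.length := by
  simp [PySem.Dict.size, PySem.Dict.keys]

-- Dict.erase facts (not in the PySem book)
theorem find?_filter_key (l : List (Int × Int)) (k v : Int) :
    (l.filter (fun p => !(p.1 == k))).find? (fun p => p.1 == v)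
      = if v = k then none else l.find? (fun p => p.1 == v) := by
  induction l with
  | nil => simp
  | cons p rest ih =>
    by_cases hvk : v = k
    · subst hvk
      by_cases hpv : p.1 = v <;> simp [hpv, ih]
    · by_cases hpk : p.1 = k <;> by_cases hpv : p.1 = v <;> simp_all

theorem get?_erase (d : PySem.Dict Int Int) (k v : Int) :
    (d.erase k).get? v = if v = k then none else d.get? v := by
  simp only [PySem.Dict.erase, PySem.Dict.get?, find?_filter_key]
  split <;> rfl

theorem keys_erase (d : PySem.Dict Int Int) (k : Int) :
    (d.erase k).keys = d.keys.filter (fun x => !(x == k)) := by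
  simp only [PySem.Dict.erase, PySem.Dict.keys, List.filter_map]
  rfl

theorem nodup_keys_erase (d : PySem.Dict Int Int) (k : Int) (h : d.keys.Nodup) :
    (d.erase k).keys.Nodup := by
  rw [keys_erase]; exact h.filter _

-- ===== A side: loop invariant =====
theorem A_loop (s : List Int) : ∀ (ans : Int) (ld rd : PySem.Dict Int Int),
    ld.keys.Nodup → rd.keys.Nodup →
    (∀ v, rd.get? v = if 0 < s.count v then some (s.count v : Int) else none) →
    (s.foldl stepA (ans, ld, rd)).1 = ans + refGo ld.keys s := by
  induction s with
  | nil => intro ans ld rd _ _ _; simp [refGo]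
  | cons t s ih =>
    intro ans ld rd hld hrd hget
    have hgt := hget t
    have hct : (t :: s).count t = s.count t + 1 := by simp
    rw [hct] at hgt
    simp only [Nat.succ_pos, if_true] at hgt
    -- the new left dict
    have hldkeys : (ld.insert t (ld.getD t 0 + 1)).keys = PySem.Set.add ld.keys t := by
      rw [PySem.Set.add_eq_ite]
      by_cases hmem : t ∈ ld.keys
      · rw [PySem.Dict.keys_insert_of_contains _ _ ((PySem.Dict.contains_iff_mem_keys _ _).mpr hmem),
          if_pos hmem]
      · rw [PySem.Dict.keys_insert_of_not_contains _ _ (by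
          rw [← Bool.not_eq_true, PySem.Dict.contains_iff_mem_keys]; exact hmem), if_neg hmem]
    have hldn' : (ld.insert t (ld.getD t 0 + 1)).keys.Nodup := PySem.Dict.nodup_keys_insert _ _ _ hld
    -- the decremented right dict
    set r1 := rd.insert t (rd.getD t 0 - 1) with hr1
    have hr1t : r1.get? t = some (s.count t : Int) := by
      rw [hr1, PySem.Dict.get?_insert_self, PySem.Dict.getD, hgt, Option.getD_some]
      congr 1; push_cast; ring
    have hr1v : ∀ v, v ≠ t → r1.get? v = (if 0 < s.count v then some (s.count v : Int) else none) := by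
      intro v hv
      rw [hr1, PySem.Dict.get?_insert_of_ne _ _ hv, hget v, List.count_cons_of_ne hv.symm]
    have hr1D : r1.getD t 0 = (s.count t : Int) := by rw [PySem.Dict.getD, hr1t]; rfl
    have hr1n : r1.keys.Nodup := PySem.Dict.nodup_keys_insert _ _ _ hrd
    -- the final right dict: invariant for s
    set r2 := if r1.getD t 0 = 0 then r1.erase t else r1 with hr2
    have hr2inv : ∀ v, r2.get? v = if 0 < s.count v then some (s.count v : Int) else none := by
      intro v
      rw [hr2]
      by_cases h0 : r1.getD t 0 = 0
      · rw [if_pos h0, get?_erase]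
        by_cases hv : v = t
        · subst hv
          rw [hr1D] at h0
          have : s.count v = 0 := by exact_mod_cast h0
          simp [this]
        · rw [if_neg hv, hr1v v hv]
      · rw [if_neg h0]
        by_cases hv : v = t
        · subst hv
          rw [hr1D] at h0
          have : 0 < s.count v := by
            rcases Nat.eq_zero_or_pos (s.count v) with h | h
            · exact absurd (by exact_mod_cast congrArg Int.ofNat h) (by simpa using h0)
            · exact h
          rw [hr1t, if_pos this]
        · exact hr1v v hv
    have hr2n : r2.keys.Nodup := by
      rw [hr2]; split
      · exact nodup_keys_erase _ _ hr1n
      · exact hr1n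
    -- r2.size = number of distinct toppings in s
    have hr2size : r2.size = (PySem.Set.ofList s).length := by
      rw [size_eq_keys_length]
      refine length_eq_of_nodup_mem hr2n (PySem.Set.nodup_ofList s) (fun x => ?_)
      rw [PySem.Set.mem_ofList, ← not_iff_not, ← PySem.Dict.get?_eq_none_iff_not_mem_keys,
        hr2inv x, ← List.count_pos_iff]
      constructor
      · intro h; by_contra hx; rw [if_pos hx] at h; exact Option.some_ne_none _ h
      · intro h; rw [if_neg (by omega)]
    -- one step of the fold
    have hstep : stepA (ans, ld, rd) t
        = ((if (PySem.Set.add ld.keys t).length = (PySem.Set.ofList s).length then ans + 1 else ans),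
           ld.insert t (ld.getD t 0 + 1), r2) := by
      simp only [stepA, hr1, hr2]
      congr 1
      rw [size_eq_keys_length, hldkeys, hr2size]
    rw [List.foldl_cons, hstep,
      ih _ _ _ hldn' hr2n hr2inv, hldkeys, refGo]
    split <;> ring

-- the counter built by A's first loop satisfies the invariant
theorem counter_get? (xs : List Int) (v : Int) :
    (PySem.Dict.counter xs).get? v = if 0 < xs.count v then some (xs.count v : Int) else none := by
  have hc := PySem.Dict.contains_counter xs v
  rw [PySem.Dict.contains_eq_isSome_get?] at hc
  by_cases hmem : v ∈ xs
  · rw [if_pos (List.count_pos_iff.mpr hmem)]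
    cases h : (PySem.Dict.counter xs).get? v with
    | none => rw [h] at hc; simp [hmem] at hc
    | some x =>
      have := PySem.Dict.getD_counter xs v
      rw [PySem.Dict.getD, h] at this
      simpa using this
  · rw [if_neg (by simp [List.count_eq_zero_of_not_mem hmem])]
    cases h : (PySem.Dict.counter xs).get? v with
    | none => rfl
    | some x => rw [h] at hc; simp [hmem] at hc

theorem A_eq (topping : List Int) : solution topping = refGo PySem.Set.empty topping := by
  unfold solution
  rw [PySem.Dict.foldl_insert_getD_add_one_eq_counter,
    A_loop topping 0 PySem.Dict.empty (PySem.Dict.counter topping)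
      (by simp [PySem.Dict.keys_empty]) (PySem.Dict.nodup_keys_counter topping)
      (counter_get? topping)]
  simp [PySem.Dict.keys_empty, PySem.Set.empty]

-- ===== B side =====
-- the values B's backward loop appends, as a recursion
def lensGo (seen : PySem.Set Int) : List Int → List Int
  | [] => []
  | t :: ys => (seen.length : Int) :: lensGo (PySem.Set.add seen t) ys

-- the suffix-distinct list B's `right` array realises
def sfx : List Int → List Int
  | [] => []
  | _ :: s => ((PySem.Set.ofList s).length : Int) :: sfx s

theorem fold1_snd (ys : List Int) : ∀ (seen : PySem.Set Int) (acc : List Int),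
    (ys.foldl stepB1 (seen, acc)).2 = acc ++ lensGo seen ys := by
  induction ys with
  | nil => intro seen acc; simp [lensGo]
  | cons t ys ih => intro seen acc; simp [stepB1, lensGo, ih, List.append_assoc]

theorem lensGo_append_singleton (a : List Int) : ∀ (seen : PySem.Set Int) (t : Int),
    lensGo seen (a ++ [t]) = lensGo seen a ++ [((a.foldl PySem.Set.add seen).length : Int)] := by
  induction a with
  | nil => intro seen t; simp [lensGo]
  | cons x a ih => intro seen t; simp [lensGo, ih]

theorem length_ofList_reverse (l : List Int) :
    (PySem.Set.ofList l.reverse).length = (PySem.Set.ofList l).length :=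
  length_eq_of_nodup_mem (PySem.Set.nodup_ofList _) (PySem.Set.nodup_ofList _)
    (fun x => by rw [PySem.Set.mem_ofList, PySem.Set.mem_ofList, List.mem_reverse])

theorem rev_lens (xs : List Int) :
    (lensGo PySem.Set.empty xs.reverse).reverse = sfx xs := by
  induction xs with
  | nil => rfl
  | cons t s ih =>
    have : (t :: s).reverse = s.reverse ++ [t] := by simp
    rw [this, lensGo_append_singleton, List.reverse_append]
    have hof : s.reverse.foldl PySem.Set.add PySem.Set.empty = PySem.Set.ofList s.reverse :=
      (PySem.Set.ofList_eq_foldl s.reverse).symm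
    rw [hof, length_ofList_reverse, ih]
    simp [sfx]

theorem fold2 (s : List Int) : ∀ (ls : PySem.Set Int) (ans : Int),
    ((s.zip (sfx s)).foldl stepB2 (ls, ans)).2 = ans + refGo ls s := by
  induction s with
  | nil => intro ls ans; simp [sfx, refGo]
  | cons t s ih =>
    intro ls ans
    rw [sfx, List.zip_cons_cons, List.foldl_cons]
    have hcond : ((((PySem.Set.add ls t).length : Int)) = ((PySem.Set.ofList s).length : Int))
        ↔ (PySem.Set.add ls t).length = (PySem.Set.ofList s).length := Nat.cast_inj
    simp only [stepB2, ih, refGo]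
    split_ifs with h1 h2 h2
    · ring
    · exact absurd (hcond.mp h1) h2
    · exact absurd (hcond.mpr h2) h1
    · ring

theorem B_eq (topping : List Int) : solution_alt topping = refGo PySem.Set.empty topping := by
  show ((topping.zip ((topping.reverse.foldl stepB1 (PySem.Set.empty, [])).2.reverse)).foldl
      stepB2 (PySem.Set.empty, 0)).2 = _
  rw [fold1_snd, List.nil_append, rev_lens, fold2, zero_add]

-- ===== VERDICT (by name: the statement is the Claim_ definition above) =====
theorem solution_spec : Claim_equal_solution := by
  intro topping _
  unfold Spec_solution
  rw [A_eq, B_eq]
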